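-- pv_equiv track=rewrite | github.com/Jason003/interview | Amazon/Find target word.py | targetWord
-- ===== SOURCE A (Python) =====
-- import collections
--
-- def targetWord(l, word):
--     ch2idx = collections.defaultdict(set)
--     for i, t in enumerate(l):
--         ch2idx[t[0]].add(i)
--         ch2idx[t[1]].add(i)
--
--     def dfs(idx, seen):
--         if idx == len(word):
--             return True
--         for i in ch2idx[word[idx]]:
--             if seen & (1 << i) == 0 and dfs(idx + 1, seen | (1 << i)):
--                 return True
--         return False
--     return dfs(0, 0)
-- ===== SOURCE B (Python) =====
-- def targetWord(l, word):
--     fail = set()  # (idx, seen) states that cannot complete word[idx:] -- each is explored once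
--
--     def dfs(idx, seen):
--         if idx == len(word):
--             return True
--         if (idx, seen) in fail:
--             return False
--         c = word[idx]
--         for i, t in enumerate(l):
--             if (c == t[0] or c == t[1]) and seen & (1 << i) == 0 and dfs(idx + 1, seen | (1 << i)):
--                 return True
--         fail.add((idx, seen))
--         return False
--     return dfs(0, 0)
-- ===== Notes on version B (the rewrite author's own statement) =====
-- stated objective: alternative
-- what changed: A's naive backtracking DFS (with a char->tile-indices dict built upfront) becomes dynamic programming: B memoizes failed (position, used-tile-mask) states in a set so no failing state is re-explored, and scans enumerate(l) directly instead of precomputing the dict.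
import Mathlib
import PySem

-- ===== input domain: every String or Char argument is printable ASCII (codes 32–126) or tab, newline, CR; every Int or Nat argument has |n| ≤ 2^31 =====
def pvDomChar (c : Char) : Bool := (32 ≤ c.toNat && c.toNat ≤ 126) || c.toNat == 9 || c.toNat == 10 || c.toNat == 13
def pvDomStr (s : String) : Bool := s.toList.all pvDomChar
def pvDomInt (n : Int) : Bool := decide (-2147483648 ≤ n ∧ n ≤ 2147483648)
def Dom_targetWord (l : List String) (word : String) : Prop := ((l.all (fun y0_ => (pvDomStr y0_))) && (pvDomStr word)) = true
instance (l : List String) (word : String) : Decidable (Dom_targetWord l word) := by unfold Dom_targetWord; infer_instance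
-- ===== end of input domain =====

-- B replaces A's naive backtracking recursion (plus char->tiles dict precomputation) by
-- dynamic programming: the same search space memoized by a set of failed (position, used-mask)
-- states, scanning the tile list directly -- each failing state is explored at most once.

-- ===== PORT A =====
-- t[0] / t[1] read via PySem.List.pyGetD on t.toList (index in range under Pre_, where s[i] is exact)
def pvChAt (t : String) (j : Int) : Char := PySem.List.pyGetD t.toList j ' '

-- for i, t in enumerate(l): ch2idx[t[0]].add(i); ch2idx[t[1]].add(i)
-- (defaultdict(set): d[k].add(i) = insert at k the set d.get(k, empty) with i added)
def pvBuildStep (d : PySem.Dict Char (List Nat)) (ti : String × Nat) : PySem.Dict Char (List Nat) :=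
  let d1 := d.insert (pvChAt ti.1 0) (PySem.Set.add (d.getD (pvChAt ti.1 0) []) ti.2)
  d1.insert (pvChAt ti.1 1) (PySem.Set.add (d1.getD (pvChAt ti.1 1) []) ti.2)

def pvBuild (l : List String) : PySem.Dict Char (List Nat) :=
  l.zipIdx.foldl pvBuildStep PySem.Dict.empty

-- dfs(idx, seen): recursion on word[idx:]; the Python int mask 'seen' is nonnegative throughout,
-- so it is carried as a Nat (1 << i, |, & == 0 are the same bits)
def pvDfs (d : PySem.Dict Char (List Nat)) : List Char → Nat → Bool
  | [], _ => true
  | c :: cs, seen =>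
      (d.getD c []).any (fun i => decide (seen &&& (1 <<< i) = 0) && pvDfs d cs (seen ||| (1 <<< i)))

def targetWord (l : List String) (word : String) : Bool :=
  pvDfs (pvBuild l) word.toList 0

-- ===== PORT B =====
-- the mutated Python set 'fail' of failed (idx, seen) states is threaded through the
-- recursion; pvLoop is the 'for i, t in enumerate(l)' loop (early 'return True' = the
-- short-circuit on a (true, _) result), which adds (idx, seen) to fail when exhausted
mutual
def pvGoB (l : List String) : List Char → Nat → Nat → PySem.Set (Nat × Nat) →
    Bool × PySem.Set (Nat × Nat)
  | [], _, _, fail => (true, fail)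
  | c :: cs, idx, seen, fail =>
      if (idx, seen) ∈ fail then (false, fail)
      else pvLoop l cs idx seen c l.zipIdx fail
termination_by cs idx seen fail => (cs.length, l.zipIdx.length + 1)

def pvLoop (l : List String) (cs : List Char) (idx seen : Nat) (c : Char) :
    List (String × Nat) → PySem.Set (Nat × Nat) → Bool × PySem.Set (Nat × Nat)
  | [], fail => (false, PySem.Set.add fail (idx, seen))
  | ti :: rest, fail =>
      if c = pvChAt ti.1 0 ∨ c = pvChAt ti.1 1 then
        if seen &&& (1 <<< ti.2) = 0 then
          match pvGoB l cs (idx + 1) (seen ||| (1 <<< ti.2)) fail with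
          | (true, fail') => (true, fail')
          | (false, fail') => pvLoop l cs idx seen c rest fail'
        else pvLoop l cs idx seen c rest fail
      else pvLoop l cs idx seen c rest fail
termination_by rest fail => (cs.length + 1, rest.length)
end

def targetWord_alt (l : List String) (word : String) : Bool :=
  (pvGoB l word.toList 0 0 []).1

-- ===== PRECONDITION & SPEC =====
-- Pre_ excludes exactly the inputs on which A raises IndexError: a tile string of length < 2 (t[1], or t[0] on "").
def Pre_targetWord (l : List String) (word : String) : Prop := ∀ t ∈ l, 2 ≤ t.toList.length
instance (l : List String) (word : String) : Decidable (Pre_targetWord l word) := by unfold Pre_targetWord; infer_instance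
def pvWitness_targetWord : List String × String := (["ab", "cd"], "bc")

def Spec_targetWord (l : List String) (word : String) (out : Bool) : Prop := out = targetWord_alt l word
instance (l : List String) (word : String) (out : Bool) : Decidable (Spec_targetWord l word out) := by unfold Spec_targetWord; infer_instance

-- ===== CLAIM (what is proved, stated in full; the proofs are below) =====
def Claim_equal_targetWord : Prop := ∀ (l : List String) (word : String), Dom_targetWord l word → Pre_targetWord l word → Spec_targetWord l word (targetWord l word)

-- ===== LEMMAS AND PROOFS =====

theorem pv_getD_insert (d : PySem.Dict Char (List Nat)) (k c : Char) (v : List Nat) :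
    (d.insert k v).getD c [] = if c = k then v else d.getD c [] := by
  by_cases h : c = k
  · subst h; simp [PySem.Dict.getD, PySem.Dict.get?_insert_self]
  · simp [PySem.Dict.getD, PySem.Dict.get?_insert_of_ne d v h, h]

theorem pv_step_mem (d0 : PySem.Dict Char (List Nat)) (ti : String × Nat) (c : Char) (i : Nat) :
    i ∈ (pvBuildStep d0 ti).getD c [] ↔
      i ∈ d0.getD c [] ∨ (i = ti.2 ∧ (c = pvChAt ti.1 0 ∨ c = pvChAt ti.1 1)) := by
  unfold pvBuildStep
  rw [pv_getD_insert]
  by_cases hc1 : c = pvChAt ti.1 1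
  · subst hc1
    rw [if_pos rfl, PySem.Set.mem_add, pv_getD_insert]
    by_cases hc0 : pvChAt ti.1 1 = pvChAt ti.1 0
    · rw [if_pos hc0, PySem.Set.mem_add, hc0]
      tauto
    · rw [if_neg hc0]
      tauto
  · rw [if_neg hc1, pv_getD_insert]
    by_cases hc0 : c = pvChAt ti.1 0
    · rw [if_pos hc0, PySem.Set.mem_add, ← hc0]
      tauto
    · rw [if_neg hc0]
      tauto

-- membership in the built dict
theorem pv_mem_build (l : List String) (c : Char) (i : Nat) :
    i ∈ (pvBuild l).getD c [] ↔
      ∃ ti ∈ l.zipIdx, i = ti.2 ∧ (c = pvChAt ti.1 0 ∨ c = pvChAt ti.1 1) := by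
  unfold pvBuild
  have h : ∀ (ps : List (String × Nat)) (d0 : PySem.Dict Char (List Nat)),
      i ∈ (ps.foldl pvBuildStep d0).getD c [] ↔
        i ∈ d0.getD c [] ∨ ∃ ti ∈ ps, i = ti.2 ∧ (c = pvChAt ti.1 0 ∨ c = pvChAt ti.1 1) := by
    intro ps
    induction ps with
    | nil => simp
    | cons ti ps ih =>
        intro d0
        simp only [List.foldl_cons, ih, pv_step_mem, List.exists_mem_cons_iff]
        exact or_assoc
  rw [h l.zipIdx PySem.Dict.empty]
  simp [PySem.Dict.getD, PySem.Dict.get?, PySem.Dict.empty]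

-- the Bool tested for one enumerated tile in B's inner loop, with A's continuation
def pvG (l : List String) (c : Char) (cs : List Char) (seen : Nat) (ti : String × Nat) : Bool :=
  (decide (c = pvChAt ti.1 0 ∨ c = pvChAt ti.1 1) && decide (seen &&& (1 <<< ti.2) = 0)) &&
    pvDfs (pvBuild l) cs (seen ||| (1 <<< ti.2))

-- A's dict-indexed inner any = B's direct scan over enumerate(l)
theorem pv_bridge (l : List String) (c : Char) (cs : List Char) (seen : Nat) :
    pvDfs (pvBuild l) (c :: cs) seen = l.zipIdx.any (pvG l c cs seen) := by
  rw [Bool.eq_iff_iff]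
  simp only [pvDfs, pvG, List.any_eq_true, Bool.and_eq_true, decide_eq_true_eq]
  constructor
  · rintro ⟨i, hi, hfree, hrec⟩
    obtain ⟨ti, hti, rfl, hedge⟩ := (pv_mem_build l c i).1 hi
    exact ⟨ti, hti, ⟨hedge, hfree⟩, hrec⟩
  · rintro ⟨ti, hti, ⟨hedge, hfree⟩, hrec⟩
    exact ⟨ti.2, (pv_mem_build l c ti.2).2 ⟨ti, hti, rfl, hedge⟩, hfree, hrec⟩

-- every state recorded in the fail set is indeed a failing state of A's dfs
def pvFailInv (l : List String) (W : List Char) (f : PySem.Set (Nat × Nat)) : Prop :=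
  ∀ p ∈ f, pvDfs (pvBuild l) (W.drop p.1) p.2 = false

-- main invariant: on a valid fail set, B's memoized search returns exactly A's dfs value
-- and keeps the fail set valid
theorem pv_goB_spec (l : List String) (W : List Char) :
    ∀ (cs : List Char) (idx seen : Nat) (f : PySem.Set (Nat × Nat)),
      cs = W.drop idx → pvFailInv l W f →
      (pvGoB l cs idx seen f).1 = pvDfs (pvBuild l) cs seen ∧
        pvFailInv l W (pvGoB l cs idx seen f).2 := by
  intro cs
  induction cs with
  | nil =>
      intro idx seen f _ hInv
      exact ⟨by simp [pvGoB, pvDfs], by simpa [pvGoB] using hInv⟩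
  | cons c cs' ih =>
      intro idx seen f hcs hInv
      by_cases hmem : (idx, seen) ∈ f
      · refine ⟨?_, by simpa [pvGoB, hmem] using hInv⟩
        have h := hInv (idx, seen) hmem
        rw [← hcs] at h
        simp [pvGoB, hmem, h]
      · have hcs' : cs' = W.drop (idx + 1) := by
          rw [← List.tail_drop, ← hcs, List.tail_cons]
        have hloop : ∀ (rest : List (String × Nat)) (f2 : PySem.Set (Nat × Nat)),
            pvFailInv l W f2 →
            (rest.any (pvG l c cs' seen) = false → pvDfs (pvBuild l) (c :: cs') seen = false) →
            (pvLoop l cs' idx seen c rest f2).1 = rest.any (pvG l c cs' seen) ∧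
              pvFailInv l W (pvLoop l cs' idx seen c rest f2).2 := by
          intro rest
          induction rest with
          | nil =>
              intro f2 hInv2 hcomplete
              refine ⟨by simp [pvLoop], ?_⟩
              intro p hp
              rw [show (pvLoop l cs' idx seen c [] f2).2 = PySem.Set.add f2 (idx, seen) from by
                simp [pvLoop]] at hp
              rcases (PySem.Set.mem_add f2 (idx, seen) p).1 hp with h | h
              · exact hInv2 p h
              · subst h
                have := hcomplete rfl
                rwa [hcs] at this
          | cons ti rest ihr =>
              intro f2 hInv2 hcomplete
              by_cases hedge : c = pvChAt ti.1 0 ∨ c = pvChAt ti.1 1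
              · by_cases hfree : seen &&& (1 <<< ti.2) = 0
                · obtain ⟨hb, hInv'⟩ :=
                    ih (idx + 1) (seen ||| (1 <<< ti.2)) f2 hcs' hInv2
                  rcases hval : pvGoB l cs' (idx + 1) (seen ||| (1 <<< ti.2)) f2 with ⟨b, f'⟩
                  rw [hval] at hb hInv'
                  simp only at hb hInv'
                  cases b with
                  | true =>
                      refine ⟨?_, ?_⟩ <;>
                        simp only [pvLoop, if_pos hedge, if_pos hfree, hval, List.any_cons]
                      · simp [pvG, hedge, hfree, ← hb]
                      · exact hInv'
                  | false =>
                      have hgti : pvG l c cs' seen ti = false := by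
                        simp [pvG, hedge, hfree, ← hb]
                      obtain ⟨h1, h2⟩ := ihr f' hInv' (by
                        intro hrest
                        exact hcomplete (by simp [List.any_cons, hgti, hrest]))
                      refine ⟨?_, ?_⟩ <;>
                        simp only [pvLoop, if_pos hedge, if_pos hfree, hval, List.any_cons, hgti,
                          Bool.false_or]
                      · exact h1
                      · exact h2
                · have hgti : pvG l c cs' seen ti = false := by simp [pvG, hfree]
                  obtain ⟨h1, h2⟩ := ihr f2 hInv2 (by
                    intro hrest
                    exact hcomplete (by simp [List.any_cons, hgti, hrest]))
                  refine ⟨?_, ?_⟩ <;>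
                    simp only [pvLoop, if_pos hedge, if_neg hfree, List.any_cons, hgti,
                      Bool.false_or]
                  · exact h1
                  · exact h2
              · have hgti : pvG l c cs' seen ti = false := by simp [pvG, hedge]
                obtain ⟨h1, h2⟩ := ihr f2 hInv2 (by
                  intro hrest
                  exact hcomplete (by simp [List.any_cons, hgti, hrest]))
                refine ⟨?_, ?_⟩ <;>
                  simp only [pvLoop, if_neg hedge, List.any_cons, hgti, Bool.false_or]
                · exact h1
                · exact h2
        obtain ⟨h1, h2⟩ := hloop l.zipIdx f hInv (by
          intro hany
          rw [pv_bridge, hany])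
        have hgo : pvGoB l (c :: cs') idx seen f = pvLoop l cs' idx seen c l.zipIdx f := by
          simp [pvGoB, hmem]
        rw [hgo]
        exact ⟨by rw [h1, pv_bridge], h2⟩

-- ===== VERDICT (by name: the statement is the Claim_ definition above) =====
theorem targetWord_spec : Claim_equal_targetWord := by
  unfold Claim_equal_targetWord
  intro l word _ _hpre
  unfold Spec_targetWord targetWord targetWord_alt
  obtain ⟨h1, -⟩ :=
    pv_goB_spec l word.toList word.toList 0 0 [] (by simp) (by intro p hp; simp at hp)
  rw [h1]
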